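-- pv_equiv track=rewrite | github.com/Tzeusy/butlers | src/butlers/core/healing/anonymizer.py | _is_safe_hostname
-- ===== SOURCE A (Python) =====
-- _SAFE_DOMAIN_SUFFIXES = (
--     ".com",
--     ".org",
--     ".net",
--     ".io",
--     ".dev",
--     ".ai",
--     ".gov",
--     ".edu",
--     ".py",  # python file extensions like foo.py
--     ".toml",
--     ".yaml",
--     ".yml",
--     ".json",
--     ".md",
--     ".txt",
--     ".log",
--     ".sh",
--     ".sql",
--     ".html",
--     ".css",
--     ".js",
--     ".ts",
--     ".rs",
--     ".go",
--     ".rb",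
-- )
--
-- _SAFE_DOMAINS = frozenset(
--     {
--         "example.com",
--         "github.com",
--         "gitlab.com",
--         "pypi.org",
--         "python.org",
--         "googleapis.com",
--         "anthropic.com",
--         "openai.com",
--         "huggingface.co",
--         "amazonaws.com",
--         "cloudflare.com",
--         "fastapi.tiangolo.com",
--         "docs.python.org",
--         "readthedocs.io",
--         "postgresql.org",
--         "redis.io",
--         "docker.com",
--         "ubuntu.com",
--     }
-- )
--
-- def _is_safe_hostname(hostname: str) -> bool:
--     """Return True if the hostname is safe to include (not internal/environment-specific)."""
--     lower = hostname.lower()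
--     # Allowed by explicit whitelist
--     if lower in _SAFE_DOMAINS:
--         return True
--     for domain in _SAFE_DOMAINS:
--         if lower.endswith("." + domain):
--             return True
--     # Allowed by suffix heuristic (file extensions, public TLDs)
--     for suffix in _SAFE_DOMAIN_SUFFIXES:
--         if lower.endswith(suffix):
--             return True
--     return False
-- ===== SOURCE B (Python) =====
-- _SAFE_TLDS = frozenset(
--     {
--         "com", "org", "net", "io", "dev", "ai", "gov", "edu",
--         "py", "toml", "yaml", "yml", "json", "md", "txt", "log",
--         "sh", "sql", "html", "css", "js", "ts", "rs", "go", "rb",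
--     }
-- )
--
-- _SAFE_DOMAIN_LABELS = frozenset(
--     {
--         ("example", "com"), ("github", "com"), ("gitlab", "com"),
--         ("pypi", "org"), ("python", "org"), ("googleapis", "com"),
--         ("anthropic", "com"), ("openai", "com"), ("huggingface", "co"),
--         ("amazonaws", "com"), ("cloudflare", "com"),
--         ("fastapi", "tiangolo", "com"), ("docs", "python", "org"),
--         ("readthedocs", "io"), ("postgresql", "org"), ("redis", "io"),
--         ("docker", "com"), ("ubuntu", "com"),
--     }
-- )
--
--
-- def _is_safe_hostname(hostname: str) -> bool:
--     """Return True if the hostname is safe to include (not internal/environment-specific)."""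
--     labels = hostname.lower().split(".")
--     # A whitelisted domain matches exactly when its label sequence is a tail of
--     # the hostname's label sequence (i = 0 is the exact match).
--     if any(tuple(labels[i:]) in _SAFE_DOMAIN_LABELS for i in range(len(labels))):
--         return True
--     # A generic safe suffix matches exactly when the hostname has at least two
--     # labels and its last label is the tld body.
--     return len(labels) > 1 and labels[-1] in _SAFE_TLDS
-- ===== Notes on version B (the rewrite author's own statement) =====
-- stated objective: alternative
-- what changed: B splits the lowercased hostname into its labels once and works on that label list: a whitelisted domain (stored as a tuple of labels) matches iff it is a tail of the label list, and a generic suffix matches iff the hostname has at least two labels and its last label is one of the tld bodies, replacing A's endswith scans over dotted string constants.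
import Mathlib
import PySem

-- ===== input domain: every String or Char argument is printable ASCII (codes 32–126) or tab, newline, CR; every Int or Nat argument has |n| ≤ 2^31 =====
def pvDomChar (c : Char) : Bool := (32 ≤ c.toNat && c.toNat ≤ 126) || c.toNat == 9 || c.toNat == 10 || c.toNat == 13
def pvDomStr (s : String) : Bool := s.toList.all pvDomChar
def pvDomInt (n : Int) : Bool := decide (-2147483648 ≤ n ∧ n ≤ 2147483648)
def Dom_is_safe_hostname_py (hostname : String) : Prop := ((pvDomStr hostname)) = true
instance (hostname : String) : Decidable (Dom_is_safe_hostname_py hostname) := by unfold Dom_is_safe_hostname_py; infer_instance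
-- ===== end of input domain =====

-- B replaces A's per-constant endswith scans by one split of the hostname into labels:
-- whitelist domains are matched as label-list tails, generic suffixes as the last label (objective: alternative).

-- ===== PORT A =====
-- A's module constants: _SAFE_DOMAINS (a frozenset of dotted strings) and _SAFE_DOMAIN_SUFFIXES
def safeDomains : List (List Char) := PySem.Set.ofList
  [ "example.com".toList, "github.com".toList, "gitlab.com".toList, "pypi.org".toList,
    "python.org".toList, "googleapis.com".toList, "anthropic.com".toList, "openai.com".toList,
    "huggingface.co".toList, "amazonaws.com".toList, "cloudflare.com".toList,
    "fastapi.tiangolo.com".toList, "docs.python.org".toList, "readthedocs.io".toList,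
    "postgresql.org".toList, "redis.io".toList, "docker.com".toList, "ubuntu.com".toList ]

def safeSuffixes : List (List Char) :=
  [ ".com".toList, ".org".toList, ".net".toList, ".io".toList, ".dev".toList, ".ai".toList,
    ".gov".toList, ".edu".toList, ".py".toList, ".toml".toList, ".yaml".toList, ".yml".toList,
    ".json".toList, ".md".toList, ".txt".toList, ".log".toList, ".sh".toList, ".sql".toList,
    ".html".toList, ".css".toList, ".js".toList, ".ts".toList, ".rs".toList, ".go".toList,
    ".rb".toList ]

def is_safe_hostname_py (hostname : String) : Bool :=
  let lower := PySem.Chars.lower hostname.toList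
  if safeDomains.contains lower then true
  else if safeDomains.any (fun domain => PySem.Chars.endswith lower ('.' :: domain)) then true
  else safeSuffixes.any (fun suffix => PySem.Chars.endswith lower suffix)

-- ===== PORT B =====
-- B's module constants: _SAFE_TLDS (tld bodies, no dots) and _SAFE_DOMAIN_LABELS (frozenset of label tuples)
def safeTlds : List (List Char) := PySem.Set.ofList
  [ "com".toList, "org".toList, "net".toList, "io".toList, "dev".toList, "ai".toList,
    "gov".toList, "edu".toList, "py".toList, "toml".toList, "yaml".toList, "yml".toList,
    "json".toList, "md".toList, "txt".toList, "log".toList, "sh".toList, "sql".toList,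
    "html".toList, "css".toList, "js".toList, "ts".toList, "rs".toList, "go".toList,
    "rb".toList ]

def safeDomainLabels : List (List (List Char)) := PySem.Set.ofList
  [ ["example".toList, "com".toList], ["github".toList, "com".toList],
    ["gitlab".toList, "com".toList], ["pypi".toList, "org".toList],
    ["python".toList, "org".toList], ["googleapis".toList, "com".toList],
    ["anthropic".toList, "com".toList], ["openai".toList, "com".toList],
    ["huggingface".toList, "co".toList], ["amazonaws".toList, "com".toList],
    ["cloudflare".toList, "com".toList], ["fastapi".toList, "tiangolo".toList, "com".toList],
    ["docs".toList, "python".toList, "org".toList], ["readthedocs".toList, "io".toList],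
    ["postgresql".toList, "org".toList], ["redis".toList, "io".toList],
    ["docker".toList, "com".toList], ["ubuntu".toList, "com".toList] ]

def is_safe_hostname_py_alt (hostname : String) : Bool :=
  let labels := PySem.Chars.splitOn (PySem.Chars.lower hostname.toList) ['.']
  if (List.range labels.length).any (fun i => safeDomainLabels.contains (labels.drop i)) then true
  else decide (labels.length > 1) && safeTlds.contains (PySem.List.pyGetD labels (-1) [])

-- ===== PRECONDITION & SPEC =====
def Spec_is_safe_hostname_py (hostname : String) (out : Bool) : Prop := out = is_safe_hostname_py_alt hostname
instance (hostname : String) (out : Bool) : Decidable (Spec_is_safe_hostname_py hostname out) := by unfold Spec_is_safe_hostname_py; infer_instance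

-- ===== CLAIM (what is proved, stated in full; the proofs are below) =====
def Claim_equal_is_safe_hostname_py : Prop := ∀ (hostname : String), Dom_is_safe_hostname_py hostname → Spec_is_safe_hostname_py hostname (is_safe_hostname_py hostname)

-- ===== LEMMAS AND PROOFS =====

-- PySem's fuel-based splitOn on a one-character separator is Mathlib's List.splitOn
lemma splitOn_go_eq (fuel : Nat) (l cur : List Char) (acc : List (List Char))
    (hf : l.length < fuel) :
    PySem.Chars.splitOn.go ['.'] fuel l cur acc
      = acc.reverse ++ (l.splitOn '.').modifyHead (cur.reverse ++ ·) := by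
  induction fuel generalizing l cur acc with
  | zero => omega
  | succ f ih =>
    cases l with
    | nil => simp [PySem.Chars.splitOn.go, List.splitOn]
    | cons c rest =>
      rw [PySem.Chars.splitOn.go]
      by_cases hc : c = '.'
      · subst hc
        rw [if_pos (by simp [List.isPrefixOf])]
        rw [ih _ _ _ (by simpa using hf)]
        simp only [List.splitOn, List.splitOnP_cons, beq_self_eq_true, if_true,
          List.reverse_cons, List.append_assoc, List.singleton_append,
          List.modifyHead_cons, List.append_nil]
        cases hh : List.splitOnP (fun x => x == '.') rest with
        | nil => exact absurd hh (List.splitOnP_ne_nil _ rest)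
        | cons a t => simp [hh]
      · rw [if_neg (by simp [List.isPrefixOf]; exact fun h => hc h.symm)]
        rw [ih _ _ _ (by simpa using Nat.lt_of_succ_lt_succ hf)]
        simp only [List.splitOn, List.splitOnP_cons, beq_iff_eq, hc, if_false,
          List.modifyHead_modifyHead]
        congr 1
        congr 1
        funext h
        simp

lemma splitOn_dot_eq (s : List Char) :
    PySem.Chars.splitOn s ['.'] = s.splitOn '.' := by
  rw [PySem.Chars.splitOn, splitOn_go_eq _ _ _ _ (by omega)]
  cases h : s.splitOn '.' with
  | nil => exact absurd h (List.splitOnP_ne_nil _ s)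
  | cons a t => simp

lemma splitOn_dot_ne_nil (s : List Char) : s.splitOn '.' ≠ [] :=
  List.splitOnP_ne_nil _ s

-- intercalate over a cons with a nonempty tail
lemma inter_cons (x : List Char) (b : List (List Char)) (hb : b ≠ []) :
    ['.'].intercalate (x :: b) = x ++ '.' :: ['.'].intercalate b := by
  cases b with
  | nil => exact absurd rfl hb
  | cons y b' => simp [List.intercalate, List.intersperse_cons₂]

lemma inter_singleton (x : List Char) : ['.'].intercalate [x] = x := by
  simp [List.intercalate]

-- intercalate over an append of two nonempty blocks of parts
lemma intercalate_append_parts (a b : List (List Char)) (ha : a ≠ []) (hb : b ≠ []) :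
    ['.'].intercalate (a ++ b) = ['.'].intercalate a ++ '.' :: ['.'].intercalate b := by
  induction a with
  | nil => exact absurd rfl ha
  | cons x a' ih =>
    cases a' with
    | nil => simpa [inter_singleton] using inter_cons x b hb
    | cons x' a'' =>
      rw [List.cons_append, inter_cons _ _ (by simp), inter_cons _ _ (by simp),
        ih (by simp)]
      simp

-- splitting at an explicit separator occurrence
lemma splitOn_append_dot (p d : List Char) :
    (p ++ '.' :: d).splitOn '.' = p.splitOn '.' ++ d.splitOn '.' := by
  simp only [List.splitOn]
  exact List.splitOnP_append_cons _ p d '.' (by simp)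

lemma splitOn_dot_free_single (t : List Char) (ht : '.' ∉ t) :
    t.splitOn '.' = [t] := by
  simp only [List.splitOn]
  refine List.splitOnP_eq_single _ _ ?_
  intro x hx
  simp only [beq_iff_eq]
  intro h; subst h; exact ht hx

-- tail-of-labels characterisation: a nonempty dot-free label list dl is a tail of
-- s.splitOn '.' iff its dotted join is s itself or a '.'-preceded suffix of s
lemma tail_iff_match (s : List Char) (dl : List (List Char)) (hdl : dl ≠ [])
    (hfree : ∀ l ∈ dl, '.' ∉ l) :
    (∃ i, i < (s.splitOn '.').length ∧ (s.splitOn '.').drop i = dl)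
      ↔ (s = ['.'].intercalate dl ∨ ('.' :: ['.'].intercalate dl) <:+ s) := by
  constructor
  · rintro ⟨i, hi, hdrop⟩
    rcases Nat.eq_zero_or_pos i with h0 | hpos
    · subst h0
      left
      conv_lhs => rw [← List.intercalate_splitOn s '.']
      rw [← hdrop]
      simp
    · right
      have hs : s = ['.'].intercalate ((s.splitOn '.').take i ++ dl) := by
        conv_lhs => rw [← List.intercalate_splitOn s '.']
        rw [← hdrop, List.take_append_drop]
      have hta : (s.splitOn '.').take i ≠ [] := by
        intro h
        have hlen : ((s.splitOn '.').take i).length = i := by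
          rw [List.length_take]; omega
        rw [h] at hlen
        simp at hlen
        omega
      rw [intercalate_append_parts _ _ hta hdl] at hs
      exact ⟨_, hs.symm⟩
  · rintro (rfl | ⟨p, hp⟩)
    · have heq := List.splitOn_intercalate _ '.' hfree hdl
      refine ⟨0, ?_, ?_⟩
      · rw [heq]; exact List.length_pos_of_ne_nil hdl
      · rw [heq]; rfl
    · have heq : s.splitOn '.' = p.splitOn '.' ++ dl := by
        rw [← hp, splitOn_append_dot, List.splitOn_intercalate _ '.' hfree hdl]
      refine ⟨(p.splitOn '.').length, ?_, ?_⟩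
      · rw [heq, List.length_append]
        have := List.length_pos_of_ne_nil hdl
        omega
      · rw [heq, List.drop_left]

-- last-label characterisation: for a dot-free t, '.'++t is a suffix of s iff s has at
-- least two labels and its last label is t
lemma last_iff (s t : List Char) (ht : '.' ∉ t) :
    ('.' :: t) <:+ s
      ↔ (1 < (s.splitOn '.').length ∧ (s.splitOn '.').getLast? = some t) := by
  constructor
  · rintro ⟨p, hp⟩
    have heq : s.splitOn '.' = p.splitOn '.' ++ [t] := by
      rw [← hp, splitOn_append_dot, splitOn_dot_free_single t ht]
    have hpne := List.length_pos_of_ne_nil (splitOn_dot_ne_nil p)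
    constructor
    · rw [heq, List.length_append]; simpa using hpne
    · rw [heq, List.getLast?_concat]
  · rintro ⟨hlen, hlast⟩
    obtain ⟨l', hl'⟩ := List.getLast?_eq_some_iff.mp hlast
    have hl'ne : l' ≠ [] := by
      intro h
      rw [h] at hl'
      rw [hl'] at hlen
      simp at hlen
    have hs : s = ['.'].intercalate (l' ++ [t]) := by
      conv_lhs => rw [← List.intercalate_splitOn s '.']
      rw [hl']
    rw [intercalate_append_parts _ _ hl'ne (by simp), inter_singleton] at hs
    exact ⟨_, hs.symm⟩

-- the two sides' constants correspond
lemma domains_eq_map :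
    safeDomains = safeDomainLabels.map (fun dl => ['.'].intercalate dl) := by decide

lemma suffixes_eq_map : safeSuffixes = safeTlds.map (fun t => '.' :: t) := by decide

lemma domainLabels_wf :
    ∀ dl ∈ safeDomainLabels, dl ≠ [] ∧ ∀ l ∈ dl, '.' ∉ l := by decide

lemma tlds_dot_free : ∀ t ∈ safeTlds, '.' ∉ t := by decide

-- B's tail scan equals A's two whitelist tests
lemma domain_scan_eq (s : List Char) :
    ((List.range (s.splitOn '.').length).any
        (fun i => safeDomainLabels.contains ((s.splitOn '.').drop i)))
      = (safeDomains.contains s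
          || safeDomains.any (fun d => PySem.Chars.endswith s ('.' :: d))) := by
  rw [Bool.eq_iff_iff]
  simp only [List.any_eq_true, List.mem_range, Bool.or_eq_true, List.contains_iff_mem,
    PySem.Chars.endswith_iff, domains_eq_map, List.mem_map]
  constructor
  · rintro ⟨i, hi, hmem⟩
    obtain ⟨hne, hfree⟩ := domainLabels_wf _ hmem
    rcases (tail_iff_match s _ hne hfree).mp ⟨i, hi, rfl⟩ with hcase | hcase
    · exact Or.inl ⟨_, hmem, hcase.symm⟩
    · exact Or.inr ⟨_, ⟨_, hmem, rfl⟩, hcase⟩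
  · rintro (⟨dl, hmem, hjoin⟩ | ⟨d, ⟨dl, hmem, hjoin⟩, hsuf⟩)
    · obtain ⟨hne, hfree⟩ := domainLabels_wf _ hmem
      obtain ⟨i, hi, hdrop⟩ := (tail_iff_match s dl hne hfree).mpr (Or.inl hjoin.symm)
      exact ⟨i, hi, hdrop ▸ hmem⟩
    · obtain ⟨hne, hfree⟩ := domainLabels_wf _ hmem
      subst hjoin
      obtain ⟨i, hi, hdrop⟩ := (tail_iff_match s dl hne hfree).mpr (Or.inr hsuf)
      exact ⟨i, hi, hdrop ▸ hmem⟩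

-- B's last-label test equals A's suffix scan
lemma suffix_scan_eq (s : List Char) :
    (safeSuffixes.any (fun suffix => PySem.Chars.endswith s suffix))
      = (decide (1 < (s.splitOn '.').length)
          && safeTlds.contains (PySem.List.pyGetD (s.splitOn '.') (-1) [])) := by
  have hne := splitOn_dot_ne_nil s
  rw [Bool.eq_iff_iff]
  rw [PySem.List.pyGetD_neg_one (s.splitOn '.') [] hne]
  simp only [List.any_eq_true, suffixes_eq_map, List.mem_map, Bool.and_eq_true,
    decide_eq_true_eq, List.contains_iff_mem, PySem.Chars.endswith_iff]
  constructor
  · rintro ⟨x, ⟨t, hmem, rfl⟩, hsuf⟩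
    obtain ⟨hlen, hlast⟩ := (last_iff s t (tlds_dot_free _ hmem)).mp hsuf
    refine ⟨hlen, ?_⟩
    have : (s.splitOn '.').getLast hne = t := by
      rw [List.getLast?_eq_some_getLast hne] at hlast
      exact Option.some.inj hlast
    rw [this]; exact hmem
  · rintro ⟨hlen, hmem⟩
    refine ⟨'.' :: (s.splitOn '.').getLast hne, ⟨_, hmem, rfl⟩, ?_⟩
    exact (last_iff s _ (tlds_dot_free _ hmem)).mpr
      ⟨hlen, List.getLast?_eq_some_getLast hne⟩

-- ===== VERDICT (by name: the statement is the Claim_ definition above) =====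
theorem is_safe_hostname_py_spec : Claim_equal_is_safe_hostname_py := by
  intro hostname _
  unfold Spec_is_safe_hostname_py is_safe_hostname_py is_safe_hostname_py_alt
  simp only [splitOn_dot_eq]
  set s := PySem.Chars.lower hostname.toList with hs
  rw [domain_scan_eq s, ← suffix_scan_eq s]
  cases hc : safeDomains.contains s <;>
    cases hd : safeDomains.any (fun d => PySem.Chars.endswith s ('.' :: d)) <;>
      simp
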